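-- pv_equiv track=rewrite | github.com/tayor/google-foobar-challenge | level5_ch1.py | solution
-- ===== SOURCE A (Python) =====
-- def solution(g):
--     h, w, s = len(g), len(g[0]), 2 << len(g)
--     cnt, n_states = [1] * s, [sum(1 << r if g[r][c] else 0 for r in range(h)) for c in range(w)]
--     sp = {i: [] for i in range(s)}
--     for i in range(s):
--         for j in range(s):
--             c = sum((1 << k) for k in range(h) if ((i & (1 << k)) >> k) + ((i & (1 << (k+1))) >> (k+1)) + ((j & (1 << k)) >> k) + ((j & (1 << (k+1))) >> (k+1)) == 1)
--             sp[c].append((i, j))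
--     for i in n_states:
--         cnt = [sum(cnt[pred[1]] for pred in sp[i] if pred[0] == j) for j in range(s)]
--     return sum(cnt)
-- ===== SOURCE B (Python) =====
-- def solution(g):
--     h = len(g)
--     w = len(g[0])
--     s = 1 << (h + 1)
--     cols = []
--     for c in range(w):
--         v = 0
--         for row in reversed(g):
--             v = 2 * v + (1 if row[c] else 0)
--         cols.append(v)
--
--     def nxt(i, j, n):
--         if n == 0:
--             return 0
--         b = 1 if (i & 1) + ((i >> 1) & 1) + (j & 1) + ((j >> 1) & 1) == 1 else 0
--         return b + 2 * nxt(i >> 1, j >> 1, n - 1)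
--
--     trans = [[nxt(i, j, h) for j in range(s)] for i in range(s)]
--     cnt = [1] * s
--     for col in cols:
--         cnt = [sum(cnt[j] for j in range(s) if ti[j] == col) for ti in trans]
--     return sum(cnt)
-- ===== Notes on version B (the rewrite author's own statement) =====
-- stated objective: alternative
-- what changed: B drops A's sp dictionary of all (i,j) transition pairs: it encodes each grid column by a reverse fold over the rows, builds a flat transition matrix with a recursive bit-peeling helper, and runs the DP by testing trans[i][j]==col inline, so there is no dict and no per-state rescan of the sp[col] pair list.
import Mathlib
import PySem

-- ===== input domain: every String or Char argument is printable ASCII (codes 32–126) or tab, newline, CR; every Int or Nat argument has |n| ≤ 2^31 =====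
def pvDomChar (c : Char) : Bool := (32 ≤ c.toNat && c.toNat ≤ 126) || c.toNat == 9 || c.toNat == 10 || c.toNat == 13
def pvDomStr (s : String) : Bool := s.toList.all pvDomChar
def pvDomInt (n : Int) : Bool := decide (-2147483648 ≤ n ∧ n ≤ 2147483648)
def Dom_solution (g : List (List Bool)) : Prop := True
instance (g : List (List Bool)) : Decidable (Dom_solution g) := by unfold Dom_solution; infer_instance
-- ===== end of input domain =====

-- B replaces A's dictionary of transition pairs by a flat transition matrix built with
-- a recursive bit-peeling helper; columns are encoded by a reverse fold over the rows
-- and each DP step tests the matrix inline instead of rescanning sp[col] (objective: alternative).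
-- All Python ints here are nonnegative, so the ports compute over Nat internally.

-- ===== PORT A =====
-- A's per-bit condition (Python's '&' '>>' on nonnegative ints = Nat's)
def pvCondA (i j k : Nat) : Bool :=
  ((i &&& (1 <<< k)) >>> k) + ((i &&& (1 <<< (k+1))) >>> (k+1)) +
  ((j &&& (1 <<< k)) >>> k) + ((j &&& (1 <<< (k+1))) >>> (k+1)) == 1

-- A's c = sum((1 << k) for k in range(h) if cond)
def pvTcA (h i j : Nat) : Nat :=
  (((List.range h).filter (fun k => pvCondA i j k)).map (fun k => 1 <<< k)).sum

def solution (g : List (List Bool)) : Int :=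
  let h := g.length
  let w := (g.headD []).length          -- g[0]; Pre_ excludes empty g (Python IndexError)
  let s := 2 <<< h
  let cnt0 : List Int := List.replicate s 1
  -- n_states; g[r][c] in range by Pre_ (short rows raise IndexError in Python)
  let nstates : List Nat := (List.range w).map (fun c =>
    ((List.range h).map (fun r => if (g.getD r []).getD c false then 1 <<< r else 0)).sum)
  -- sp = {i: [] for i in range(s)}
  let seed : PySem.Dict Nat (List (Nat × Nat)) :=
    (List.range s).foldl (fun d i => d.insert i []) PySem.Dict.empty
  -- sp[c].append((i, j)): in-place append at key c (always present: c < 2^h < s) = modify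
  let sp := (List.range s).foldl (fun d i =>
    (List.range s).foldl (fun d j =>
      let c := pvTcA h i j
      d.modify c [] (fun l => l ++ [(i, j)])) d) seed
  -- for i in n_states: cnt = [sum(cnt[pred[1]] for pred in sp[i] if pred[0] == j) for j in range(s)]
  let cnt := nstates.foldl (fun cnt col =>
    (List.range s).map (fun jj =>
      (((sp.getD col []).filter (fun p => p.1 == jj)).map (fun p => cnt.getD p.2 0)).sum)) cnt0
  cnt.sum

-- ===== PORT B =====
-- B's nxt(i, j, n): recursive peel of the two low bits
def pvNext (n i j : Nat) : Nat :=
  match n with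
  | 0 => 0
  | Nat.succ m =>
    (if (i &&& 1) + ((i >>> 1) &&& 1) + (j &&& 1) + ((j >>> 1) &&& 1) == 1 then 1 else 0)
      + 2 * pvNext m (i >>> 1) (j >>> 1)

def solution_alt (g : List (List Bool)) : Int :=
  let h := g.length
  let w := (g.headD []).length          -- g[0]; Pre_ excludes empty g (Python IndexError)
  let s := 1 <<< (h + 1)
  -- cols: per column c, v = 0; for row in reversed(g): v = 2*v + row[c]
  let cols : List Nat := (List.range w).map (fun c =>
    g.reverse.foldl (fun v row => 2 * v + (if row.getD c false then 1 else 0)) 0)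
  -- trans = [[nxt(i, j, h) for j in range(s)] for i in range(s)]
  let trans : List (List Nat) :=
    (List.range s).map (fun i => (List.range s).map (fun j => pvNext h i j))
  -- for col in cols: cnt = [sum(cnt[j] for j in range(s) if ti[j] == col) for ti in trans]
  let cnt := cols.foldl (fun cnt col =>
    trans.map (fun ti =>
      (((List.range s).filter (fun j => ti.getD j 0 == col)).map (fun j => cnt.getD j 0)).sum))
    (List.replicate s (1 : Int))
  cnt.sum

-- ===== PRECONDITION & SPEC =====
-- Pre_ excludes exactly the inputs where Python A raises IndexError: the empty grid
-- (g[0]) and grids with a row shorter than the first row (g[r][c]).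
def Pre_solution (g : List (List Bool)) : Prop :=
  g ≠ [] ∧ ∀ row ∈ g, (g.headD []).length ≤ row.length
instance (g : List (List Bool)) : Decidable (Pre_solution g) := by unfold Pre_solution; infer_instance
def pvWitness_solution : List (List Bool) := [[true, false], [false, false]]

def Spec_solution (g : List (List Bool)) (out : Int) : Prop := out = solution_alt g
instance (g : List (List Bool)) (out : Int) : Decidable (Spec_solution g out) := by unfold Spec_solution; infer_instance

-- ===== CLAIM (what is proved, stated in full; the proofs are below) =====
def Claim_equal_solution : Prop := ∀ (g : List (List Bool)), Dom_solution g → Pre_solution g → Spec_solution g (solution g)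

-- ===== LEMMAS AND PROOFS =====

-- Python's (i & (1<<k)) >> k equals (i >> k) & 1 on Nat
theorem pvBit (i k : Nat) : (i &&& (1 <<< k)) >>> k = (i >>> k) &&& 1 := by
  rw [Nat.one_shiftLeft, Nat.and_two_pow, Nat.shiftRight_eq_div_pow, Nat.shiftRight_eq_div_pow,
    Nat.and_one_is_mod, Nat.mul_div_cancel _ (Nat.two_pow_pos k)]
  rcases Nat.mod_two_eq_zero_or_one (i / 2 ^ k) with h | h <;>
    simp [Nat.testBit, Nat.shiftRight_eq_div_pow, Nat.one_and_eq_mod_two, h]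

-- shifting the condition index = shifting the arguments
theorem pvCondShift (i j k : Nat) : pvCondA i j (k+1) = pvCondA (i >>> 1) (j >>> 1) k := by
  simp only [pvCondA, pvBit]
  rw [show k + 1 + 1 = 1 + (1 + k) from by omega, show k + 1 = 1 + k from by omega]
  simp [Nat.shiftRight_add]

-- A's filter/shift sum equals B's recursive bit-peel
theorem pvTcNext (h : Nat) : ∀ i j, pvTcA h i j = pvNext h i j := by
  induction h with
  | zero => intro i j; simp [pvTcA, pvNext]
  | succ m ih =>
    intro i j
    rw [pvTcA, List.range_succ_eq_map, List.filter_cons]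
    have hsum : ((((List.range m).filter (pvCondA i j ∘ Nat.succ)).map
        ((fun k => 1 <<< k) ∘ Nat.succ))).sum
        = 2 * pvNext m (i >>> 1) (j >>> 1) := by
      rw [show ((fun k => 1 <<< k) ∘ Nat.succ) = (fun k => 2 * (1 <<< k)) from
          funext (fun k => by simp [Nat.shiftLeft_eq, pow_succ]; ring_nf),
        show (pvCondA i j ∘ Nat.succ) = (fun k => pvCondA (i >>> 1) (j >>> 1) k) from
          funext (fun k => by simp [Function.comp, pvCondShift]),
        ← ih (i >>> 1) (j >>> 1), pvTcA]
      induction ((List.range m).filter (fun k => pvCondA (i >>> 1) (j >>> 1) k)) with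
      | nil => simp
      | cons a L ihl => simp [List.map_cons, List.sum_cons, ihl]; ring
    by_cases hb : pvCondA i j 0 = true
    · have hb2 : i % 2 + i >>> 1 % 2 + j % 2 + j >>> 1 % 2 = 1 := by
        have h := hb; simp only [pvCondA, pvBit] at h; simpa [Nat.and_one_is_mod] using h
      simp [hb, hb2, pvNext, List.filter_map, List.map_map, hsum]
    · have hb2 : ¬ (i % 2 + i >>> 1 % 2 + j % 2 + j >>> 1 % 2 = 1) := by
        have h := hb; simp only [pvCondA, pvBit] at h; simpa [Nat.and_one_is_mod] using h
      simp [hb, hb2, pvNext, List.filter_map, List.map_map, hsum]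

-- 2 << h = 1 << (h+1)
theorem pvSEq (h : Nat) : 2 <<< h = 1 <<< (h + 1) := by
  simp [Nat.shiftLeft_eq, pow_succ]; ring

-- A's indexed column sum equals B's reversed row loop
theorem pvColEq (g : List (List Bool)) (c : Nat) :
    ((List.range g.length).map (fun r => if (g.getD r []).getD c false then 1 <<< r else 0)).sum
      = g.reverse.foldl (fun v row => 2 * v + (if row.getD c false then 1 else 0)) 0 := by
  rw [List.foldl_reverse]
  induction g with
  | nil => simp
  | cons row rest ih =>
    rw [List.foldr_cons, ← ih, List.length_cons, List.range_succ_eq_map, List.map_cons,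
      List.map_map, List.sum_cons]
    have hmap : (List.range rest.length).map
        ((fun r => if ((row :: rest).getD r []).getD c false then 1 <<< r else 0) ∘ Nat.succ)
        = (List.range rest.length).map
          (fun r => 2 * (if (rest.getD r []).getD c false then 1 <<< r else 0)) := by
      refine List.map_congr_left (fun r _ => ?_)
      simp only [Function.comp, List.getD, List.getElem?_cons_succ]
      have : (1 : Nat) <<< (r + 1) = 2 * (1 <<< r) := by
        simp [Nat.shiftLeft_eq, pow_succ]; ring
      split <;> simp [this]
    rw [hmap, List.sum_map_mul_left]
    set S := (List.map (fun r => if (rest.getD r []).getD c false then 1 <<< r else 0) (List.range rest.length)).sum with hS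
    simp only [List.getD, List.getElem?_cons_zero, Option.getD_some, Nat.shiftLeft_zero]
    by_cases hb : row[c]?.getD false = true <;> simp [hb] <;> omega

-- entry i of a map over range, i < s
theorem pvMapRangeGetD {β : Type} (f : Nat → β) (s i : Nat) (d : β) (h : i < s) :
    ((List.range s).map f).getD i d = f i := by
  simp [List.getD_eq_getElem?_getD, h]

-- the flattened list of (i, j) loop pairs
def pvPairs (s : Nat) : List (Nat × Nat) :=
  (List.range s).flatMap (fun i => (List.range s).map (fun j => (i, j)))

-- nested foldl over ranges = foldl over the flattened pair list
theorem pvNestFold {δ : Type} (s : Nat) (step : δ → Nat → Nat → δ) (d0 : δ) :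
    (List.range s).foldl (fun d i => (List.range s).foldl (fun d j => step d i j) d) d0
      = (pvPairs s).foldl (fun d p => step d p.1 p.2) d0 := by
  rw [pvPairs, List.foldl_flatMap]
  apply List.foldl_ext
  intro d i _
  rw [List.foldl_map]

-- dict built by an append-at-key loop: lookup = filtered projection of the loop list
theorem pvGetDFold {α κ β : Type} [BEq κ] [LawfulBEq κ] [DecidableEq κ]
    (key : α → κ) (val : α → β) (L : List α) :
    ∀ (d : PySem.Dict κ (List β)) (k : κ),
      (L.foldl (fun d a => d.modify (key a) [] (fun l => l ++ [val a])) d).getD k []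
        = d.getD k [] ++ (L.filter (fun a => key a == k)).map val := by
  induction L with
  | nil => simp
  | cons a L ih =>
    intro d k
    rw [List.foldl_cons, ih, PySem.Dict.getD_modify, List.filter_cons]
    by_cases h : key a == k
    · have h' : k = key a := (beq_iff_eq.mp h).symm
      simp [h', List.append_assoc]
    · have h' : ¬ (k = key a) := fun e => by simp [e] at h
      simp [h, h']

-- the seed dict {i: [] for i in range(s)} answers [] everywhere
theorem pvSeedGetD (L : List Nat) :
    ∀ (d : PySem.Dict Nat (List (Nat × Nat))), (∀ k, d.getD k [] = []) →
      ∀ k, (L.foldl (fun d i => d.insert i []) d).getD k [] = [] := by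
  induction L with
  | nil => exact fun d h k => h k
  | cons a L ih =>
    intro d h k
    refine ih _ (fun k' => ?_) k
    rw [PySem.Dict.getD_insert]
    split
    · rfl
    · exact h k'

-- a flatMap all of whose blocks but one are empty
theorem pvFlatMapSingle {β : Type} (f : Nat → List β) (jj : Nat) (L : List Nat)
    (hnd : L.Nodup) (hmem : jj ∈ L) (hz : ∀ i ∈ L, i ≠ jj → f i = []) :
    L.flatMap f = f jj := by
  induction L with
  | nil => cases hmem
  | cons a L ih =>
    rw [List.flatMap_cons]
    by_cases ha : a = jj
    · subst ha
      have : ∀ i ∈ L, f i = [] := fun i hi =>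
        hz i (List.mem_cons_of_mem _ hi) (fun e => (List.nodup_cons.mp hnd).1 (e ▸ hi))
      simp [List.flatMap_eq_nil_iff.mpr this]
    · rw [hz a (List.mem_cons_self) ha, List.nil_append]
      exact ih (List.nodup_cons.mp hnd).2
        ((List.mem_cons.mp hmem).resolve_left (fun e => ha e.symm))
        (fun i hi => hz i (List.mem_cons_of_mem _ hi))

-- filtering the pair list to first component jj picks the jj block
theorem pvPairsFilterFst (s jj : Nat) (hjj : jj < s) (q : Nat × Nat → Bool) :
    (pvPairs s).filter (fun p => p.1 == jj && q p)
      = ((List.range s).filter (fun j => q (jj, j))).map (fun j => (jj, j)) := by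
  rw [pvPairs, List.filter_flatMap]
  rw [pvFlatMapSingle (fun i => ((List.range s).map (fun j => (i, j))).filter
        (fun p => p.1 == jj && q p)) jj (List.range s) (List.nodup_range) (List.mem_range.mpr hjj)
      (fun i _ hne => by
        beta_reduce
        rw [List.filter_map]
        have : ∀ j ∈ List.range s,
            ((fun p => p.1 == jj && q p) ∘ (fun j => (i, j))) j = false := by
          intro j _
          simp [Function.comp, hne]
        rw [List.filter_congr this, List.filter_false, List.map_nil])]
  rw [List.filter_map]
  refine congrArg _ (List.filter_congr ?_)
  intro j _
  simp [Function.comp]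

theorem solution_spec : Claim_equal_solution := by
  unfold Claim_equal_solution Spec_solution
  intro g _ _
  simp only [solution, solution_alt, ← pvSEq]
  -- align the column lists
  rw [show ((List.range (g.headD []).length).map (fun c =>
      g.reverse.foldl (fun v row => 2 * v + (if row.getD c false then 1 else 0)) 0))
      = ((List.range (g.headD []).length).map (fun c =>
        ((List.range g.length).map (fun r => if (g.getD r []).getD c false then 1 <<< r else 0)).sum)) from
    List.map_congr_left (fun c _ => (pvColEq g c).symm)]
  refine congrArg List.sum ?_
  apply List.foldl_ext
  intro cnt col _
  rw [List.map_map]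
  apply List.map_congr_left
  intro jj hjj
  have hlt : jj < 2 <<< g.length := List.mem_range.mp hjj
  -- A side: flatten the nested dict-building loop, then read the lookup as a filter
  simp only [pvNestFold (δ := PySem.Dict Nat (List (Nat × Nat))) (2 <<< g.length)
      (fun d i j => d.modify (pvTcA g.length i j) [] (fun l => l ++ [(i, j)]))]
  rw [pvGetDFold (fun p : Nat × Nat => pvTcA g.length p.1 p.2) (fun p => p),
    pvSeedGetD (List.range (2 <<< g.length)) PySem.Dict.empty
      (fun k => PySem.Dict.getD_empty k []) col, List.nil_append, List.map_id',
    List.filter_filter]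
  -- collapse the pair list to the jj block and align the transition functions
  rw [show (fun a : Nat × Nat => a.1 == jj && pvTcA g.length a.1 a.2 == col)
        = (fun p : Nat × Nat => p.1 == jj && (fun p : Nat × Nat => pvTcA g.length p.1 p.2 == col) p) from
      funext (fun a => by simp),
    pvPairsFilterFst _ _ hlt, List.map_map]
  rw [show (fun j => pvTcA g.length jj j == col) = (fun j => pvNext g.length jj j == col) from
    funext (fun j => by rw [pvTcNext])]
  -- B side: ti[j] for j ∈ range s is nxt(jj, j)
  have hB : (List.range (2 <<< g.length)).filter
      (fun j => ((List.range (2 <<< g.length)).map (fun j' => pvNext g.length jj j')).getD j 0 == col)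
      = (List.range (2 <<< g.length)).filter (fun j => pvNext g.length jj j == col) :=
    List.filter_congr (fun j hj => by
      rw [pvMapRangeGetD _ _ _ _ (List.mem_range.mp hj)])
  simp only [Function.comp]
  rw [hB]
  rfl
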